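-- pv_equiv track=rewrite | github.com/imedkablavi/discord-rich-presence | detectors/window.py | _extract_wm_name
-- ===== SOURCE A (Python) =====
-- def _extract_wm_name(props: str) -> str:
--     """Extract window title from WM_NAME or _NET_WM_NAME"""
--     # Prefer _NET_WM_NAME (UTF-8) over WM_NAME
--     for line in props.split('\n'):
--         if '_NET_WM_NAME(UTF8_STRING)' in line:
--             parts = line.split('=', 1)
--             if len(parts) > 1:
--                 return parts[1].strip().strip('"')
--
--     for line in props.split('\n'):
--         if 'WM_NAME(STRING)' in line:
--             parts = line.split('=', 1)
--             if len(parts) > 1: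
--                 return parts[1].strip().strip('"')
--
--     return ''
-- ===== SOURCE B (Python) =====
-- def _extract_wm_name(props: str) -> str:
--     """Extract window title from WM_NAME or _NET_WM_NAME (single pass)."""
--     net = None
--     wm = None
--     for line in props.split('\n'):
--         if net is None and '_NET_WM_NAME(UTF8_STRING)' in line:
--             parts = line.split('=', 1)
--             if len(parts) > 1:
--                 net = parts[1].strip().strip('"')
--         if wm is None and 'WM_NAME(STRING)' in line:
--             parts = line.split('=', 1)
--             if len(parts) > 1:
--                 wm = parts[1].strip().strip('"')
--     if net is not None:
--         return net
--     return wm if wm is not None else ''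
-- ===== Notes on version B (the rewrite author's own statement) =====
-- stated objective: alternative
-- what changed: Replaces A's two sequential scans of the split lines (early return per marker) with one single pass maintaining two optional accumulators (net/wm, set only on first valid match) and a final preference check.
import Mathlib
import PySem

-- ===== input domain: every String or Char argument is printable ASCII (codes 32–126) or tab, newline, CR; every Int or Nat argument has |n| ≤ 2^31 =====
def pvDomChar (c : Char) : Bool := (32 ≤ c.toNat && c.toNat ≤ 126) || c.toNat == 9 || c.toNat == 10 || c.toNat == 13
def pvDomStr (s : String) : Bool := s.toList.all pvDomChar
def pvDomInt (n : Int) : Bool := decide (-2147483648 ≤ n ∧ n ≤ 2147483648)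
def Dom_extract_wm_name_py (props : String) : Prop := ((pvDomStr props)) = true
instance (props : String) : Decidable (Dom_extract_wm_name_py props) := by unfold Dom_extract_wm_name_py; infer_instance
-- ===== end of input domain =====

-- B replaces A's two sequential scans over the split lines by one single pass
-- maintaining two optional accumulators (objective: alternative decomposition, same cost).


def pvNetMarker : List Char := "_NET_WM_NAME(UTF8_STRING)".toList
def pvWmMarker : List Char := "WM_NAME(STRING)".toList

-- ===== PORT A =====
-- one of A's two identical `for`/`return` loops, parametrised by the marker
def pvPassA (marker : List Char) : List (List Char) → Option (List Char)
  | [] => none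
  | line :: rest =>
    if PySem.Chars.isIn marker line then
      let parts := PySem.Chars.splitOnMax line ['='] 1
      if parts.length > 1 then
        some (PySem.Chars.stripChars (PySem.Chars.strip (parts.getD 1 [])) ['"'])
      else pvPassA marker rest
    else pvPassA marker rest

def extract_wm_name_py (props : String) : String :=
  let lines := PySem.Chars.splitOn props.toList ['\n']
  match pvPassA pvNetMarker lines with
  | some v => String.ofList v
  | none =>
    match pvPassA pvWmMarker lines with
    | some v => String.ofList v
    | none => ""

-- ===== PORT B =====
-- one step of B's single pass: each component is set once, when still `none`
def pvStepB (st : Option (List Char) × Option (List Char)) (line : List Char) :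
    Option (List Char) × Option (List Char) :=
  let net :=
    match st.1 with
    | some v => some v
    | none =>
      if PySem.Chars.isIn pvNetMarker line then
        let parts := PySem.Chars.splitOnMax line ['='] 1
        if parts.length > 1 then
          some (PySem.Chars.stripChars (PySem.Chars.strip (parts.getD 1 [])) ['"'])
        else none
      else none
  let wm :=
    match st.2 with
    | some v => some v
    | none =>
      if PySem.Chars.isIn pvWmMarker line then
        let parts := PySem.Chars.splitOnMax line ['='] 1
        if parts.length > 1 then
          some (PySem.Chars.stripChars (PySem.Chars.strip (parts.getD 1 [])) ['"'])
        else none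
      else none
  (net, wm)

def extract_wm_name_py_alt (props : String) : String :=
  let st := (PySem.Chars.splitOn props.toList ['\n']).foldl pvStepB (none, none)
  match st.1 with
  | some v => String.ofList v
  | none =>
    match st.2 with
    | some v => String.ofList v
    | none => ""

-- ===== PRECONDITION & SPEC =====
def Spec_extract_wm_name_py (props : String) (out : String) : Prop := out = extract_wm_name_py_alt props
instance (props : String) (out : String) : Decidable (Spec_extract_wm_name_py props out) := by unfold Spec_extract_wm_name_py; infer_instance

-- ===== CLAIM (what is proved, stated in full; the proofs are below) =====
def Claim_equal_extract_wm_name_py : Prop := ∀ (props : String), Dom_extract_wm_name_py props → Spec_extract_wm_name_py props (extract_wm_name_py props)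

-- ===== LEMMAS AND PROOFS =====

-- what one line contributes for a given marker (proof-only abbreviation)
def pvGrab (marker line : List Char) : Option (List Char) :=
  if PySem.Chars.isIn marker line then
    let parts := PySem.Chars.splitOnMax line ['='] 1
    if parts.length > 1 then
      some (PySem.Chars.stripChars (PySem.Chars.strip (parts.getD 1 [])) ['"'])
    else none
  else none

lemma pvPassA_cons (marker line : List Char) (rest : List (List Char)) :
    pvPassA marker (line :: rest) =
      match pvGrab marker line with
      | some v => some v
      | none => pvPassA marker rest := by
  simp only [pvPassA, pvGrab]
  split_ifs <;> rfl

lemma pvStepB_fst (st : Option (List Char) × Option (List Char)) (line : List Char) :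
    (pvStepB st line).1 =
      match st.1 with
      | some v => some v
      | none => pvGrab pvNetMarker line := by
  simp only [pvStepB, pvGrab]

lemma pvStepB_snd (st : Option (List Char) × Option (List Char)) (line : List Char) :
    (pvStepB st line).2 =
      match st.2 with
      | some v => some v
      | none => pvGrab pvWmMarker line := by
  simp only [pvStepB, pvGrab]

lemma pvFold_fst (lines : List (List Char)) :
    ∀ st : Option (List Char) × Option (List Char),
      (lines.foldl pvStepB st).1 =
        match st.1 with
        | some v => some v
        | none => pvPassA pvNetMarker lines := by
  induction lines with
  | nil => intro st; cases h : st.1 <;> simp [pvPassA, h]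
  | cons line rest ih =>
    intro st
    rw [List.foldl_cons, ih, pvStepB_fst, pvPassA_cons]
    cases st.1 with
    | some v => rfl
    | none => cases pvGrab pvNetMarker line <;> rfl

lemma pvFold_snd (lines : List (List Char)) :
    ∀ st : Option (List Char) × Option (List Char),
      (lines.foldl pvStepB st).2 =
        match st.2 with
        | some v => some v
        | none => pvPassA pvWmMarker lines := by
  induction lines with
  | nil => intro st; cases h : st.2 <;> simp [pvPassA, h]
  | cons line rest ih =>
    intro st
    rw [List.foldl_cons, ih, pvStepB_snd, pvPassA_cons]
    cases st.2 with
    | some v => rfl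
    | none => cases pvGrab pvWmMarker line <;> rfl

-- ===== VERDICT (by name: the statement is the Claim_ definition above) =====
theorem extract_wm_name_py_spec : Claim_equal_extract_wm_name_py := by
  intro props _
  unfold Spec_extract_wm_name_py extract_wm_name_py extract_wm_name_py_alt
  simp only [pvFold_fst, pvFold_snd]
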